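-- pv_equiv track=rewrite | github.com/ndthang2802/CS114.M11 | WecodeAssignment/BAI2/XepDiem.py | soDiemCanMua
-- ===== SOURCE A (Python) =====
-- def soDiemCanMua(n):
--     a = 0
--     b = 0
--     c = 0
--     t = 0
--     r = 0
--     if n >= 4:
--         x = n//4
--         a = x
--         b = x
--         c = 2*x
--         t = x * 4
--         r = n - t
--     else:
--         a = 1
--         b = 1
--         c = 0
--
--         t = 2
--
--         r = n-2
--
--     while a + b != c or r > 0 :
--         if c < a+b:
--             c+=1
--             r-=1
--             t+=1
--         else:
--             if a <= b:
--                 a+=1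
--                 r-=1
--                 t+=1
--             else:
--                 b+=1
--                 r-=1
--                 t+=1
--     return t-n
-- ===== SOURCE B (Python) =====
-- def soDiemCanMua(n):
--     if n < 4:
--         return 4 - n
--     return (-n) % 2
-- ===== Notes on version B (the rewrite author's own statement) =====
-- stated objective: simpler
-- what changed: Replaced the five-variable state-machine simulation loop by a two-case closed form: 4 - n below the threshold, otherwise (-n) % 2.
import Mathlib
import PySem

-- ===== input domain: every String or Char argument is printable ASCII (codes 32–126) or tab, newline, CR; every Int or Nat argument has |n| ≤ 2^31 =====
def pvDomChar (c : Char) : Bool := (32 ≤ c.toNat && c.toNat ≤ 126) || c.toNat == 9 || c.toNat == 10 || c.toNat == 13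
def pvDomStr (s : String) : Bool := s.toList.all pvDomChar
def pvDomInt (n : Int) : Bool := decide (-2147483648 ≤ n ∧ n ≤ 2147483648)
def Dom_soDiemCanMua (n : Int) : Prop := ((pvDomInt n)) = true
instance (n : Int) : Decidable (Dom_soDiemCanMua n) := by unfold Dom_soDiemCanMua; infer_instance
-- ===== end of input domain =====

-- B replaces A's five-variable simulation loop by a closed form (4-n for n<4, else (-n) % 2); objective: faster/simpler.

-- ===== PORT A =====
-- A's while loop over the state (a,b,c,t,r), as a structural recursion on a fuel
-- that is a totality guard only: 2*max(r,0)+|a+b-c| strictly decreases per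
-- iteration and is ≥ 1 whenever the loop condition holds, so the fuel chosen in
-- soDiemCanMuaRun is never exhausted before the loop condition turns false.
def soDiemCanMuaLoop (fuel : Nat) (a b c t r : Int) : Int :=
  match fuel with
  | 0 => t
  | f + 1 =>
    if a + b ≠ c ∨ r > 0 then
      if c < a + b then
        soDiemCanMuaLoop f a b (c+1) (t+1) (r-1)
      else
        if a ≤ b then
          soDiemCanMuaLoop f (a+1) b c (t+1) (r-1)
        else
          soDiemCanMuaLoop f a (b+1) c (t+1) (r-1)
    else t

def soDiemCanMuaRun (a b c t r : Int) : Int :=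
  soDiemCanMuaLoop ((2 * max r 0).toNat + (a + b - c).natAbs) a b c t r

def soDiemCanMua (n : Int) : Int :=
  if n ≥ 4 then
    let x := PySem.Int.floordiv n 4
    soDiemCanMuaRun x x (2*x) (x*4) (n - x*4) - n
  else
    soDiemCanMuaRun 1 1 0 2 (n-2) - n

-- ===== PORT B =====
def soDiemCanMua_alt (n : Int) : Int :=
  if n < 4 then 4 - n else PySem.Int.mod (-n) 2

-- ===== PRECONDITION & SPEC =====
def Spec_soDiemCanMua (n : Int) (out : Int) : Prop := out = soDiemCanMua_alt n
instance (n : Int) (out : Int) : Decidable (Spec_soDiemCanMua n out) := by unfold Spec_soDiemCanMua; infer_instance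

-- ===== CLAIM (what is proved, stated in full; the proofs are below) =====
def Claim_equal_soDiemCanMua : Prop := ∀ (n : Int), Dom_soDiemCanMua n → Spec_soDiemCanMua n (soDiemCanMua n)

-- ===== LEMMAS AND PROOFS =====

-- one unfolding step of the loop
theorem loop_succ (f : Nat) (a b c t r : Int) :
    soDiemCanMuaLoop (f+1) a b c t r =
      if a + b ≠ c ∨ r > 0 then
        if c < a + b then soDiemCanMuaLoop f a b (c+1) (t+1) (r-1)
        else if a ≤ b then soDiemCanMuaLoop f (a+1) b c (t+1) (r-1)
        else soDiemCanMuaLoop f a (b+1) c (t+1) (r-1)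
      else t := rfl

-- When the loop state is balanced (a+b=c) with r ≤ 0 it exits at once, for any fuel.
theorem loop_done (f : Nat) (a b c t r : Int) (hb : a + b = c) (hr : r ≤ 0) :
    soDiemCanMuaLoop f a b c t r = t := by
  cases f with
  | zero => rfl
  | succ f => rw [loop_succ, if_neg (by omega)]

-- n < 4 branch: the loop raises c twice and stops with t = 4 (any fuel ≥ 2).
theorem loop_small (f : Nat) (n : Int) (h : n < 4) :
    soDiemCanMuaLoop (f+2) 1 1 0 2 (n-2) = 4 := by
  rw [show f+2 = (f+1)+1 from rfl, loop_succ, if_pos (by omega), if_pos (by omega)]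
  rw [loop_succ, if_pos (by omega), if_pos (by omega)]
  exact loop_done f 1 1 2 4 (n - 2 - 1 - 1) (by omega) (by omega)

-- n ≥ 4 branch, balanced start with remainder r ∈ {0,1,2,3}: four explicit traces,
-- each run with the exact fuel soDiemCanMuaRun supplies.
theorem loop_big (x n : Int) (hr0 : 0 ≤ n - 4*x) (hr3 : n - 4*x ≤ 3) :
    soDiemCanMuaLoop (2 * (n - 4*x)).toNat x x (2*x) (4*x) (n - 4*x)
      = 4*x + 2 * ((n - 4*x + 1) / 2) := by
  set r := n - 4*x with hr
  interval_cases r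
  · rw [loop_done _ x x (2*x) (4*x) 0 (by ring) (by omega)]; norm_num
  · rw [show ((2:Int) * 1).toNat = 1+1 from rfl]
    rw [loop_succ, if_pos (by omega), if_neg (by omega), if_pos le_rfl]
    rw [loop_succ, if_pos (by omega), if_pos (by omega)]
    rw [loop_done 0 (x+1) x (2*x+1) (4*x+1+1) (1-1-1) (by ring) (by omega)]
    ring
  · rw [show ((2:Int) * 2).toNat = 1+1+1+1 from rfl]
    rw [loop_succ, if_pos (by omega), if_neg (by omega), if_pos le_rfl]
    rw [loop_succ, if_pos (by omega), if_pos (by omega)]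
    rw [loop_done (1+1) (x+1) x (2*x+1) (4*x+1+1) (2-1-1) (by ring) (by omega)]
    ring
  · rw [show ((2:Int) * 3).toNat = 1+1+1+1+1+1 from rfl]
    rw [loop_succ, if_pos (by omega), if_neg (by omega), if_pos le_rfl]
    rw [loop_succ, if_pos (by omega), if_pos (by omega)]
    rw [loop_succ, if_pos (by omega), if_neg (by omega), if_neg (by omega)]
    rw [loop_succ, if_pos (by omega), if_pos (by omega)]
    rw [loop_done (1+1) (x+1) (x+1) (2*x+1+1) (4*x+1+1+1+1) (3-1-1-1-1) (by ring) (by omega)]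
    ring

-- ===== VERDICT (by name: the statement is the Claim_ definition above) =====
theorem soDiemCanMua_spec : Claim_equal_soDiemCanMua := by
  intro n _
  unfold Spec_soDiemCanMua soDiemCanMua soDiemCanMua_alt soDiemCanMuaRun
  by_cases h : n ≥ 4
  · rw [if_pos h, if_neg (by omega)]
    have hx : PySem.Int.floordiv n 4 = n / 4 := PySem.Int.floordiv_eq_ediv_of_pos (by norm_num)
    have hm : PySem.Int.mod (-n) 2 = (-n) % 2 := PySem.Int.mod_eq_emod_of_pos (by norm_num)
    simp only [hx, hm]
    have h4 : 4 * (n / 4) ≤ n ∧ n - 4 * (n / 4) ≤ 3 := by constructor <;> omega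
    have key := loop_big (n / 4) n (by omega) (by omega)
    rw [show n / 4 + n / 4 - 2 * (n / 4) = 0 from by ring]
    rw [show n / 4 * 4 = 4 * (n / 4) from by ring]
    rw [show (Int.natAbs 0) = 0 from rfl, Nat.add_zero]
    rw [show max (n - 4 * (n/4)) 0 = n - 4 * (n/4) from by omega, key]
    omega
  · rw [if_neg h, if_pos (by omega)]
    have e1 : (1:Int) + 1 - 0 = 2 := by norm_num
    rw [e1, show (Int.natAbs 2) = 2 from rfl]
    obtain ⟨k, hk⟩ : ∃ k, ((2:Int) * max (n-2) 0).toNat + 2 = k + 2 := ⟨_, rfl⟩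
    rw [hk, loop_small k n (by omega)]
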